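-- pv_equiv track=rewrite | github.com/johnzhoudev/leetcode-practice | meta/Hops.py | solve
-- ===== SOURCE A (Python) =====
-- def solve(n, f, p):
--     p.sort()
--
--     headFrog = p[0] # on lilipad
--
--     def dist(f1, f2): # hops for f1 to get to just behind f2
--         if f1 == f2: return 0 # for handling if same
--         if f1 > f2: return dist(f2, f1)
--         return f2 - f1 - 1
--
--     numJumps = 0
--     for nextFrog in p[1:]:
--         numJumps += dist(headFrog, nextFrog)
--         headFrog = nextFrog
--
--     # so now all 1 group
--     numJumps += dist(headFrog, n) # get to n-1th lilipad, could be 0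
--
--     # Now all jump to end
--     numJumps += f # number of frogs
--
--     return numJumps
-- ===== SOURCE B (Python) =====
-- def solve(n, f, p):
--     # closed form: hops to gather all frogs just behind the max, then behind n, then f final jumps.
--     # (Does not mutate p, unlike A which sorts it in place; return values agree.)
--     lo = min(p)
--     hi = max(p)
--     d = len(set(p))
--     tail = 0 if hi == n else abs(n - hi) - 1
--     return (hi - lo) - (d - 1) + tail + f
-- ===== Notes on version B (the rewrite author's own statement) =====
-- stated objective: simpler
-- what changed: Replaced sort-then-scan accumulation of pairwise gaps (with a recursive dist helper) by the direct closed form (max-min)-(distinct-1)+tail+f computed from min(p), max(p) and len(set(p)); B also does not mutate p, while A sorts it in place (return values agree).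
import Mathlib
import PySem

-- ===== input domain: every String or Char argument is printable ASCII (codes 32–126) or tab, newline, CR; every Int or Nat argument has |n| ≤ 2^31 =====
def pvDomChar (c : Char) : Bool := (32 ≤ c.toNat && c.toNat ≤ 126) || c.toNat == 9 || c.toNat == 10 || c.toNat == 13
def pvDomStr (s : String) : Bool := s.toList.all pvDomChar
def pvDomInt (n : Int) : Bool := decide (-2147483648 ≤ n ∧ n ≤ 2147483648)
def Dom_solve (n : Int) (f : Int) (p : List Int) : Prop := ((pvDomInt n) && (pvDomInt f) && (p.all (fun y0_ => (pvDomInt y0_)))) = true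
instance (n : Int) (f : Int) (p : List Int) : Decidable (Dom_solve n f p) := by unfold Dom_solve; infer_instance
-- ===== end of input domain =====

-- B replaces A's sort + adjacent-gap scan by a closed form from min/max/distinct-count
-- (no sorting; note A sorts p in place while B does not — equivalence here is about the return value only).

-- ===== PORT A =====
-- dist's recursion swaps its arguments at most once; the single recursive call is unrolled literally.
def distA (f1 f2 : Int) : Int :=
  if f1 = f2 then 0
  else if f1 > f2 then
    -- dist(f2, f1) with f2 < f1, f2 ≠ f1: returns f1 - f2 - 1
    f1 - f2 - 1
  else f2 - f1 - 1

def solve (n : Int) (f : Int) (p : List Int) : Int :=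
  match PySem.List.sorted p (fun x => x) false with   -- p.sort()
  | [] => 0   -- p[0] raises IndexError; excluded by Pre_solve
  | headFrog :: rest =>
    let st := rest.foldl (fun (st : Int × Int) nextFrog =>
      (st.1 + distA st.2 nextFrog, nextFrog)) ((0 : Int), headFrog)
    st.1 + distA st.2 n + f

-- ===== PORT B =====
def solve_alt (n : Int) (f : Int) (p : List Int) : Int :=
  match PySem.List.min? p (fun x => x), PySem.List.max? p (fun x => x) with
  | some lo, some hi =>
    let d : Int := (PySem.Set.ofList p).length
    let tail : Int := if hi = n then 0 else |n - hi| - 1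
    (hi - lo) - (d - 1) + tail + f
  | _, _ => 0   -- unreachable: min/max of the empty list raise; excluded by Pre_solve

-- ===== PRECONDITION & SPEC =====
-- A evaluates p[0] (and B min(p)/max(p)), which raise on the empty list: Pre_ excludes p = [].
def Pre_solve (n : Int) (f : Int) (p : List Int) : Prop := p ≠ []
instance (n : Int) (f : Int) (p : List Int) : Decidable (Pre_solve n f p) := by unfold Pre_solve; infer_instance
def pvWitness_solve : Int × Int × List Int := (10, 3, [2, 5, 5, 7])

def Spec_solve (n : Int) (f : Int) (p : List Int) (out : Int) : Prop := out = solve_alt n f p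
instance (n : Int) (f : Int) (p : List Int) (out : Int) : Decidable (Spec_solve n f p out) := by unfold Spec_solve; infer_instance

-- ===== CLAIM (what is proved, stated in full; the proofs are below) =====
def Claim_equal_solve : Prop := ∀ (n : Int) (f : Int) (p : List Int), Dom_solve n f p → Pre_solve n f p → Spec_solve n f p (solve n f p)

-- ===== LEMMAS AND PROOFS =====

-- the last element of a ≤-sorted nonempty list is an upper bound
theorem last_is_max (h : Int) (t : List Int) (hp : (h :: t).Pairwise (· ≤ ·)) :
    ∀ y ∈ h :: t, y ≤ t.getLastD h := by
  induction t generalizing h with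
  | nil => simp
  | cons a t' ih =>
    rcases List.pairwise_cons.1 hp with ⟨hha, hp'⟩
    have hmax := ih a hp'
    intro y hy
    rcases List.mem_cons.1 hy with rfl | hy'
    · rw [List.getLastD_cons]
      calc y ≤ a := hha a (List.mem_cons_self)
        _ ≤ t'.getLastD a := hmax a (List.mem_cons_self)
    · rw [List.getLastD_cons]; exact hmax y hy'

-- telescoping the gap scan: the fold returns ((last - h) - (#distinct - 1), last)
theorem fold_chain (h : Int) (t : List Int) (hp : (h :: t).Pairwise (· ≤ ·)) :
    t.foldl (fun (st : Int × Int) nf => (st.1 + distA st.2 nf, nf)) ((0 : Int), h)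
      = ((t.getLastD h - h) - (((h :: t).dedup.length : Int) - 1), t.getLastD h) := by
  -- generalize the accumulator
  suffices H : ∀ (acc : Int) (h : Int) (t : List Int), (h :: t).Pairwise (· ≤ ·) →
      t.foldl (fun (st : Int × Int) nf => (st.1 + distA st.2 nf, nf)) (acc, h)
        = (acc + (t.getLastD h - h) - (((h :: t).dedup.length : Int) - 1), t.getLastD h) by
    have := H 0 h t hp; simpa using this
  intro acc h t
  induction t generalizing acc h with
  | nil => intro _; simp [List.dedup]
  | cons a t' ih =>
    intro hp
    rcases List.pairwise_cons.1 hp with ⟨hha, hp'⟩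
    have hha' : h ≤ a := hha a List.mem_cons_self
    have hstep := ih (acc + distA h a) a hp'
    have hmem : h ∈ a :: t' ↔ h = a := by
      constructor
      · intro hm
        have hub : ∀ y ∈ a :: t', a ≤ y := by
          intro y hy
          rcases List.mem_cons.1 hy with rfl | hy'
          · exact le_refl _
          · exact (List.pairwise_cons.1 hp').1 y hy'
        exact le_antisymm hha' (hub h hm)
      · intro he; exact he ▸ List.mem_cons_self
    simp only [List.foldl_cons, hstep]
    by_cases he : h = a
    · subst he
      have hd : (h :: h :: t').dedup = (h :: t').dedup := by
        simp [List.dedup_cons_of_mem, hmem.mpr rfl]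
      rw [hd]
      simp only [List.getLastD_cons, Prod.mk.injEq]
      refine ⟨?_, trivial⟩
      simp [distA]
    · have hnm : h ∉ a :: t' := fun hm => he (hmem.mp hm)
      have hd : (h :: a :: t').dedup = h :: (a :: t').dedup := List.dedup_cons_of_notMem hnm
      rw [hd]
      have hlt : h < a := lt_of_le_of_ne hha' he
      simp only [List.length_cons, List.getLastD_cons]
      simp [distA, he, hlt.not_gt]
      omega

theorem solve_spec_main (n f : Int) (p : List Int) (hne : p ≠ []) :
    solve n f p = solve_alt n f p := by
  -- name the sorted list and split it
  rcases hs : PySem.List.sorted p (fun x => x) false with _ | ⟨h, t⟩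
  · exact absurd ((PySem.List.sorted_eq_nil_iff _ _ _).1 hs) hne
  have hperm : (h :: t).Perm p := hs ▸ PySem.List.sorted_perm p _ _
  have hp : (h :: t).Pairwise (· ≤ ·) := by
    have := PySem.List.sorted_pairwise p (fun x => x) (κ := Int)
    rw [hs] at this; simpa using this
  -- min? p = some h
  have hhmem : h ∈ p := hperm.mem_iff.1 List.mem_cons_self
  have hhmin : ∀ y ∈ p, h ≤ y := by
    intro y hy
    have hy' : y ∈ h :: t := hperm.mem_iff.2 hy
    rcases List.mem_cons.1 hy' with rfl | hy''
    · exact le_refl _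
    · exact (List.pairwise_cons.1 hp).1 y hy''
  obtain ⟨lo, hlo⟩ : ∃ lo, PySem.List.min? p (fun x => x) = some lo := by
    cases hmo : PySem.List.min? p (fun x => x) with
    | none => exact absurd ((PySem.List.min?_eq_none_iff _ _).1 hmo) hne
    | some lo => exact ⟨lo, rfl⟩
  have hlo_eq : lo = h :=
    le_antisymm (PySem.List.min?_isMin hlo h hhmem |>.trans_eq rfl)
      (hhmin lo (PySem.List.min?_mem hlo))
  -- max? p = some last
  set L := t.getLastD h with hL
  have hLmem : L ∈ p := by
    have : L ∈ h :: t := by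
      cases t with
      | nil => simp [hL]
      | cons a t' =>
        have : (a :: t').getLastD h = (a :: t').getLast (by simp) := by
          simp [List.getLastD_eq_getLast?, List.getLast?_eq_some_getLast]
        rw [hL, this]
        exact List.mem_cons_of_mem _ (List.getLast_mem _)
    exact hperm.mem_iff.1 this
  have hLmax : ∀ y ∈ p, y ≤ L := fun y hy =>
    last_is_max h t hp y (hperm.mem_iff.2 hy)
  obtain ⟨hi, hhi⟩ : ∃ hi, PySem.List.max? p (fun x => x) = some hi := by
    cases hmo : PySem.List.max? p (fun x => x) with
    | none => exact absurd ((PySem.List.max?_eq_none_iff _ _).1 hmo) hne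
    | some hi => exact ⟨hi, rfl⟩
  have hhi_eq : hi = L :=
    le_antisymm (hLmax hi (PySem.List.max?_mem hhi))
      (PySem.List.max?_isMax hhi L hLmem)
  -- distinct counts agree: both sides count p.toFinset.card
  have hdedup : ((h :: t).dedup.length : Int) = ((PySem.Set.ofList p).length : Int) := by
    have h1 : (h :: t).dedup.length = (h :: t).toFinset.card := (List.card_toFinset _).symm
    have h2 : (h :: t).toFinset = p.toFinset := by
      ext x; rw [List.mem_toFinset, List.mem_toFinset, hperm.mem_iff]
    have h3 : (PySem.Set.ofList p).toFinset = p.toFinset := by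
      ext x
      simp [List.mem_toFinset, PySem.Set.mem_ofList]
    have h4 : (PySem.Set.ofList p).length = (PySem.Set.ofList p).toFinset.card :=
      (List.toFinset_card_of_nodup (PySem.Set.nodup_ofList p)).symm
    rw [h1, h2, h4, h3]
  -- assemble
  unfold solve solve_alt
  rw [hs, hlo, hhi]
  simp only [fold_chain h t hp, hlo_eq, hhi_eq, ← hL, ← hdedup]
  have htail : distA L n = if L = n then 0 else |n - L| - 1 := by
    unfold distA
    rcases lt_trichotomy L n with hlt | heq | hgt
    · rw [if_neg hlt.ne, if_neg (not_lt.2 hlt.le), if_neg hlt.ne, abs_of_pos (by omega)]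
    · simp [heq]
    · rw [if_neg hgt.ne', if_pos hgt, if_neg hgt.ne', abs_of_neg (by omega)]
      omega
  rw [htail]

-- ===== VERDICT (by name: the statement is the Claim_ definition above) =====
theorem solve_spec : Claim_equal_solve := by
  intro n f p _ hpre
  exact solve_spec_main n f p hpre
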